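-- pv_equiv track=rewrite | github.com/roperete/lrs-dashboard | scripts/merge_spreadsheet.py | gap_fill
-- ===== SOURCE A (Python) =====
-- def gap_fill(target: dict, source: dict, fields: list[str]):
--     """Fill missing/null fields in target from source. Returns count of fields filled."""
--     filled = 0
--     for field in fields:
--         src_val = source.get(field)
--         if src_val is None:
--             continue
--         tgt_val = target.get(field)
--         if tgt_val is None or tgt_val == "" or tgt_val == "null":
--             target[field] = src_val
--             filled += 1
--     return filled
-- ===== SOURCE B (Python) =====
-- def gap_fill(target: dict, source: dict, fields: list[str]):
--     """Fill missing/null fields in target from source. Returns count of fields filled."""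
--     needed = [f for f in dict.fromkeys(fields)
--               if source.get(f) is not None
--               and target.get(f) in (None, "", "null")]
--     for f in needed:
--         target[f] = source[f]
--     return len(needed)
-- ===== Notes on version B (the rewrite author's own statement) =====
-- stated objective: simpler
-- what changed: Replaces the stateful single pass (whose fill test reads the target dict it is mutating) with a two-pass decomposition: a comprehension over the distinct fields selects those needing a fill against the original target, then a separate loop assigns them and the count is the list's length.
-- intended difference: On inputs where some field occurs more than once in fields, its source value is itself '' or 'null' and its target value is missing/''/'null', A re-fills and re-counts that field at every duplicate occurrence (returning the inflated count), while B counts each distinct field it fills exactly once, which is what 'count of fields filled' intends. — e.g. on gap_fill([("a", some "")], [("a", some "null")], ["a", "a"]): A returns 2, B returns 1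
import Mathlib
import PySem

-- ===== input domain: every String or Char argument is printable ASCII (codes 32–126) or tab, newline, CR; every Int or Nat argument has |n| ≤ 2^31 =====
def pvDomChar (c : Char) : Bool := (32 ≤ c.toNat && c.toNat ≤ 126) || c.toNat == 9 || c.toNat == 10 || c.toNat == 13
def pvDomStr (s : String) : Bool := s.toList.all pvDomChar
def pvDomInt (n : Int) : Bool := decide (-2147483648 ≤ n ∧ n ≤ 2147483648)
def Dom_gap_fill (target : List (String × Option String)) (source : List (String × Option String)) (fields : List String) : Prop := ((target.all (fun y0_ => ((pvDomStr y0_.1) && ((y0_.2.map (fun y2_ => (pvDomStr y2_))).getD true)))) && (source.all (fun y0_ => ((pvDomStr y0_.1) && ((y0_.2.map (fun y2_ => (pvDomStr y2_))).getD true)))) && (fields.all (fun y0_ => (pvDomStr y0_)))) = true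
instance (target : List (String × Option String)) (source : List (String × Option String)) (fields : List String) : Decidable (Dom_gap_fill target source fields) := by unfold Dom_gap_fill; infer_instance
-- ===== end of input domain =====

-- B replaces A's stateful single pass with a two-pass decomposition (select the distinct fields
-- needing a fill against the original target, then assign them; the count is that list's length).
-- Return-value equivalence outside D_; both Pythons leave `target` in the identical final state.


-- ===== PORT A =====
-- loop body of A: src_val = source.get(field); continue on None; fill (and count) when the
-- current target value is None/""/"null". Python's dict.get returns None both for a missing
-- key and for a stored None, hence the .join on the Option (Option String) lookup.
def pvStepA (source : List (String × Option String))
    (st : PySem.Dict String (Option String) × Int) (field : String) :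
    PySem.Dict String (Option String) × Int :=
  match ((PySem.Dict.mk source).get? field).join with
  | none => st
  | some v =>
    if (st.1.get? field).join = none ∨ (st.1.get? field).join = some "" ∨
        (st.1.get? field).join = some "null" then
      (st.1.insert field (some v), st.2 + 1)
    else st

def gap_fill (target : List (String × Option String)) (source : List (String × Option String))
    (fields : List String) : Int :=
  (fields.foldl (pvStepA source) (PySem.Dict.mk target, 0)).2

-- ===== PORT B =====
-- the comprehension over dict.fromkeys(fields): distinct fields (first-occurrence order) whose
-- source value is not None and whose ORIGINAL target value is None/""/"null"; the Python's
-- second loop only mutates `target`, so the RETURN value is len(needed).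
def gap_fill_alt (target : List (String × Option String)) (source : List (String × Option String))
    (fields : List String) : Int :=
  let needed := (PySem.List.dedup fields).filter (fun f =>
    (((PySem.Dict.mk source).get? f).join).isSome &&
    (((PySem.Dict.mk target).get? f).join == none ||
     ((PySem.Dict.mk target).get? f).join == some "" ||
     ((PySem.Dict.mk target).get? f).join == some "null"))
  (needed.length : Int)

-- ===== PRECONDITION & SPEC =====
-- On inputs where some field occurs more than once in `fields`, its source value is itself ""
-- or "null" and its target value is missing/""/"null", A re-fills and re-counts that field at
-- every duplicate occurrence (returning the inflated count), while B counts each distinct field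
-- it fills exactly once, which is what "count of fields filled" intends.
def D_gap_fill (target : List (String × Option String)) (source : List (String × Option String)) (fields : List String) : Prop :=
  ∃ f ∈ fields, 2 ≤ fields.count f ∧ (source.lookup f).join ∈ [some "", some "null"] ∧
    (target.lookup f).join ∈ [none, some "", some "null"]
instance (target : List (String × Option String)) (source : List (String × Option String)) (fields : List String) : Decidable (D_gap_fill target source fields) := by unfold D_gap_fill; infer_instance

def Spec_gap_fill (target : List (String × Option String)) (source : List (String × Option String)) (fields : List String) (out : Int) : Prop := ¬ D_gap_fill target source fields → out = gap_fill_alt target source fields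
instance (target : List (String × Option String)) (source : List (String × Option String)) (fields : List String) (out : Int) : Decidable (Spec_gap_fill target source fields out) := by unfold Spec_gap_fill; infer_instance

def pvDiffWitness_gap_fill : (List (String × Option String)) × (List (String × Option String)) × List String :=
  ([("a", some "")], [("a", some "null")], ["a", "a"])
def pvDiffWitnessOut_gap_fill : Int × Int := (2, 1)

-- ===== CLAIM (what is proved, stated in full; the proofs are below) =====
def Claim_unchanged_gap_fill : Prop := ∀ (target : List (String × Option String)) (source : List (String × Option String)) (fields : List String), Dom_gap_fill target source fields → Spec_gap_fill target source fields (gap_fill target source fields)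
def Claim_changed_gap_fill : Prop := Dom_gap_fill (pvDiffWitness_gap_fill.1) (pvDiffWitness_gap_fill.2.1) (pvDiffWitness_gap_fill.2.2) ∧ D_gap_fill (pvDiffWitness_gap_fill.1) (pvDiffWitness_gap_fill.2.1) (pvDiffWitness_gap_fill.2.2) ∧ gap_fill (pvDiffWitness_gap_fill.1) (pvDiffWitness_gap_fill.2.1) (pvDiffWitness_gap_fill.2.2) = pvDiffWitnessOut_gap_fill.1 ∧ gap_fill_alt (pvDiffWitness_gap_fill.1) (pvDiffWitness_gap_fill.2.1) (pvDiffWitness_gap_fill.2.2) = pvDiffWitnessOut_gap_fill.2 ∧ pvDiffWitnessOut_gap_fill.1 ≠ pvDiffWitnessOut_gap_fill.2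
def Claim_exact_gap_fill : Prop := ∀ (target : List (String × Option String)) (source : List (String × Option String)) (fields : List String), Dom_gap_fill target source fields → D_gap_fill target source fields → gap_fill target source fields ≠ gap_fill_alt target source fields

-- ===== LEMMAS AND PROOFS =====

-- what Python's source.get(f) / the ORIGINAL target.get(f) return
def pvSrc (source : List (String × Option String)) (f : String) : Option String :=
  ((PySem.Dict.mk source).get? f).join

def pvTgt0 (target : List (String × Option String)) (f : String) : Option String :=
  ((PySem.Dict.mk target).get? f).join

def pvEmpty (t : Option String) : Bool :=
  decide (t = none ∨ t = some "" ∨ t = some "null")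

-- the Dict view of an association-list input looks values up exactly like List.lookup
lemma pv_get_mk_eq_lookup (d : List (String × Option String)) (f : String) :
    (PySem.Dict.mk d).get? f = d.lookup f := by
  induction d with
  | nil => simp [PySem.Dict.get?]
  | cons p d ih =>
    rw [show p = (p.1, p.2) from rfl, PySem.Dict.get?_mk_cons, List.lookup_cons]
    by_cases h : p.1 = f
    · subst h; simp
    · have h1 : (p.1 == f) = false := by simpa using h
      have h2 : (f == p.1) = false := by simpa using Ne.symm h
      simp [h1, h2, ih]

lemma pvD_iff (target source : List (String × Option String)) (fields : List String) :
    D_gap_fill target source fields ↔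
      ∃ f ∈ fields, 2 ≤ fields.count f ∧
        (pvSrc source f = some "" ∨ pvSrc source f = some "null") ∧
        pvEmpty (pvTgt0 target f) = true := by
  unfold D_gap_fill pvSrc pvTgt0 pvEmpty
  simp [pv_get_mk_eq_lookup]

-- total contribution of a distinct field occurring k times to A's count
def pvContrib (target source : List (String × Option String)) (f : String) (k : Int) : Int :=
  match pvSrc source f with
  | none => 0
  | some v => if pvEmpty (pvTgt0 target f) then (if v = "" ∨ v = "null" then k else 1) else 0

-- has A's loop over `fields` filled field g?
def pvFilledB (target source : List (String × Option String)) (fields : List String)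
    (g : String) : Bool :=
  decide (g ∈ fields) && (pvSrc source g).isSome && pvEmpty (pvTgt0 target g)

-- A's value in closed form
def pvSum (target source : List (String × Option String)) (fields : List String) : Int :=
  ((PySem.List.dedup fields).map (fun f => pvContrib target source f (fields.count f))).sum

-- B's per-distinct-field contribution
def pvCB (target source : List (String × Option String)) (f : String) : Int :=
  if (pvSrc source f).isSome && pvEmpty (pvTgt0 target f) then 1 else 0

lemma pvStepA_eq (source : List (String × Option String))
    (st : PySem.Dict String (Option String) × Int) (f : String) :
    pvStepA source st f =
      match pvSrc source f with
      | none => st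
      | some v =>
        if pvEmpty ((st.1.get? f).join) then (st.1.insert f (some v), st.2 + 1) else st := by
  simp only [pvStepA, pvSrc, pvEmpty]
  cases ((PySem.Dict.mk source).get? f).join <;> simp

-- changing a nodup list's summand at one member changes the sum by the difference there
lemma pv_sum_map_update {α : Type} (L : List α) (f : α) (h h' : α → Int)
    (hnd : L.Nodup) (hf : f ∈ L) (hagree : ∀ g ∈ L, g ≠ f → h' g = h g) :
    (L.map h').sum = (L.map h).sum + (h' f - h f) := by
  induction L with
  | nil => cases hf
  | cons a L ih =>
    rcases List.mem_cons.mp hf with rfl | hfL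
    · have : ∀ g ∈ L, h' g = h g := by
        intro g hg
        exact hagree g (List.mem_cons_of_mem _ hg) (fun he => (List.nodup_cons.mp hnd).1 (he ▸ hg))
      simp [List.map_congr_left this]; ring
    · have ha : h' a = h a :=
        hagree a List.mem_cons_self (fun he => (List.nodup_cons.mp hnd).1 (he ▸ hfL))
      have := ih (List.nodup_cons.mp hnd).2 hfL
        (fun g hg hne => hagree g (List.mem_cons_of_mem _ hg) hne)
      simp [ha, this]; ring

lemma pvSum_append (target source : List (String × Option String)) (fs : List String)
    (f : String) :
    pvSum target source (fs ++ [f]) =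
      pvSum target source fs +
        (if f ∈ fs then
          pvContrib target source f ((fs.count f : Int) + 1) -
            pvContrib target source f (fs.count f)
         else pvContrib target source f 1) := by
  unfold pvSum
  have hded : PySem.List.dedup (fs ++ [f]) = PySem.Set.add (PySem.List.dedup fs) f := by
    simp [PySem.List.dedup_eq_ofList, PySem.Set.ofList_append_singleton]
  by_cases hf : f ∈ fs
  · have hfd : f ∈ PySem.List.dedup fs := (PySem.List.mem_dedup fs f).mpr hf
    rw [hded, PySem.Set.add_of_mem hfd, if_pos hf]
    rw [pv_sum_map_update (PySem.List.dedup fs) f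
      (fun g => pvContrib target source g (fs.count g))
      (fun g => pvContrib target source g ((fs ++ [f]).count g))
      (PySem.List.nodup_dedup fs) hfd ?_]
    · simp [List.count_append]
    · intro g _ hne
      simp [List.count_append, Ne.symm hne]
  · have hfd : f ∉ PySem.List.dedup fs := fun h => hf ((PySem.List.mem_dedup fs f).mp h)
    rw [hded, PySem.Set.add_of_not_mem hfd, if_neg hf, List.map_append, List.sum_append]
    have hcong : ∀ g ∈ PySem.List.dedup fs,
        pvContrib target source g ((fs ++ [f]).count g) = pvContrib target source g (fs.count g) := by
      intro g hg
      have hne : g ≠ f := fun he => hf (he ▸ (PySem.List.mem_dedup fs g).mp hg)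
      simp [List.count_append, Ne.symm hne]
    rw [List.map_congr_left hcong]
    have hc0 : fs.count f = 0 := List.count_eq_zero.mpr hf
    simp [List.count_append, hc0]

lemma pvFilledB_append (target source : List (String × Option String)) (fs : List String)
    (f g : String) :
    pvFilledB target source (fs ++ [f]) g =
      (pvFilledB target source fs g ||
        (decide (g = f) && (pvSrc source g).isSome && pvEmpty (pvTgt0 target g))) := by
  by_cases h : g = f
  · simp [pvFilledB, List.mem_append, h]
    tauto
  · simp [pvFilledB, List.mem_append, h]

-- invariant of A's loop: the dict holds the source value exactly on the filled fields,
-- and the counter equals the closed-form sum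
lemma pv_foldA (target source : List (String × Option String)) (fields : List String) :
    (∀ g, (((fields.foldl (pvStepA source) (PySem.Dict.mk target, 0)).1).get? g).join
        = if pvFilledB target source fields g then pvSrc source g else pvTgt0 target g)
    ∧ (fields.foldl (pvStepA source) (PySem.Dict.mk target, 0)).2
        = pvSum target source fields := by
  induction fields using List.reverseRecOn with
  | nil => simp [pvFilledB, pvSum, pvTgt0]
  | append_singleton fs f ih =>
    obtain ⟨ihd, ihn⟩ := ih
    rw [List.foldl_append, List.foldl_cons, List.foldl_nil, pvStepA_eq]
    cases hs : pvSrc source f with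
    | none =>
      dsimp only
      constructor
      · intro g
        rw [ihd g, pvFilledB_append]
        by_cases hgf : g = f
        · subst hgf
          simp [hs]
        · simp [hgf]
      · rw [ihn, pvSum_append]
        have : pvContrib target source f = fun _ => 0 := by
          funext k; simp [pvContrib, hs]
        simp [this]
    | some v =>
      dsimp only
      rw [ihd f]
      by_cases hF : pvFilledB target source fs f
      · rw [if_pos hF, hs]
        have hmem : f ∈ fs := by
          have := hF
          simp only [pvFilledB, Bool.and_eq_true, decide_eq_true_eq] at this
          exact this.1.1
        have hemp : pvEmpty (pvTgt0 target f) = true := by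
          have := hF
          simp only [pvFilledB, Bool.and_eq_true] at this
          exact this.2
        by_cases hv : pvEmpty (some v)
        · rw [if_pos hv]
          have hvv : v = "" ∨ v = "null" := by
            simpa [pvEmpty] using hv
          constructor
          · intro g
            by_cases hgf : g = f
            · subst hgf
              rw [pvFilledB_append]
              simp [hF, PySem.Dict.get?_insert_self, hs]
            · rw [PySem.Dict.get?_insert_of_ne _ _ (Ne.intro hgf), ihd g, pvFilledB_append]
              simp [hgf]
          · rw [ihn, pvSum_append, if_pos hmem]
            simp [pvContrib, hs, hemp, hvv]
        · rw [if_neg hv]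
          have hvv : ¬(v = "" ∨ v = "null") := by
            simpa [pvEmpty] using hv
          constructor
          · intro g
            rw [ihd g, pvFilledB_append]
            by_cases hgf : g = f
            · subst hgf; simp [hF]
            · simp [hgf]
          · rw [ihn, pvSum_append, if_pos hmem]
            simp [pvContrib, hs, hemp, hvv]
      · rw [if_neg hF]
        by_cases hemp : pvEmpty (pvTgt0 target f)
        · rw [if_pos hemp]
          have hnmem : f ∉ fs := by
            intro hmem
            apply hF
            simp [pvFilledB, hmem, hs, hemp]
          constructor
          · intro g
            by_cases hgf : g = f
            · subst hgf
              rw [pvFilledB_append]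
              simp [PySem.Dict.get?_insert_self, hs, hemp]
            · rw [PySem.Dict.get?_insert_of_ne _ _ (Ne.intro hgf), ihd g, pvFilledB_append]
              simp [hgf]
          · rw [ihn, pvSum_append, if_neg hnmem]
            simp [pvContrib, hs, hemp]
        · rw [if_neg hemp]
          constructor
          · intro g
            rw [ihd g, pvFilledB_append]
            by_cases hgf : g = f
            · subst hgf; simp [hF, hemp]
            · simp [hgf]
          · rw [ihn, pvSum_append]
            have : pvContrib target source f = fun _ => 0 := by
              funext k
              simp [pvContrib, hs, hemp]
            simp [this]

lemma pv_A_closed (target source : List (String × Option String)) (fields : List String) :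
    gap_fill target source fields = pvSum target source fields :=
  (pv_foldA target source fields).2

-- a filter's length is the sum of 0/1 indicators
lemma pv_filter_length_sum {α : Type} (L : List α) (p : α → Bool) :
    ((L.filter p).length : Int) = (L.map (fun x => if p x then (1 : Int) else 0)).sum := by
  induction L with
  | nil => simp
  | cons a L ih =>
    by_cases h : p a
    · simp [h, ih]; ring
    · simp [h, ih]

lemma pv_B_closed (target source : List (String × Option String)) (fields : List String) :
    gap_fill_alt target source fields
      = ((PySem.List.dedup fields).map (pvCB target source)).sum := by
  unfold gap_fill_alt
  rw [pv_filter_length_sum]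
  apply congrArg List.sum
  apply List.map_congr_left
  intro f _
  unfold pvCB pvSrc pvTgt0 pvEmpty
  cases ht : ((PySem.Dict.mk target).get? f).join <;>
    cases hs : ((PySem.Dict.mk source).get? f).join <;>
      simp

-- outside D_, each distinct field contributes the same to both counts
lemma pv_contrib_eq_cb (target source : List (String × Option String)) (fields : List String)
    (hD : ¬ D_gap_fill target source fields) :
    ∀ f ∈ PySem.List.dedup fields,
      pvContrib target source f (fields.count f) = pvCB target source f := by
  intro f hfd
  have hf : f ∈ fields := (PySem.List.mem_dedup fields f).mp hfd
  have hc1 : 1 ≤ fields.count f := List.count_pos_iff.mpr hf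
  unfold pvContrib pvCB
  cases hs : pvSrc source f with
  | none => simp
  | some v =>
    by_cases he : pvEmpty (pvTgt0 target f)
    · by_cases hv : v = "" ∨ v = "null"
      · have hcle : fields.count f < 2 := by
          by_contra hge
          exact hD ((pvD_iff target source fields).mpr
            ⟨f, hf, by omega, by rcases hv with rfl | rfl <;> simp [hs], he⟩)
        have : fields.count f = 1 := by omega
        simp [hv, this, he]
      · simp [hv, he]
    · simp [he]

lemma pv_one_le_sum {α : Type} (L : List α) (d : α → Int) (f : α)
    (hpos : ∀ g ∈ L, 0 ≤ d g) (hf : f ∈ L) (h1 : 1 ≤ d f) :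
    1 ≤ (L.map d).sum := by
  induction L with
  | nil => cases hf
  | cons a L ih =>
    have ha : 0 ≤ d a := hpos a List.mem_cons_self
    have hLpos : 0 ≤ (L.map d).sum := by
      apply List.sum_nonneg
      intro x hx
      obtain ⟨g, hg, rfl⟩ := List.mem_map.mp hx
      exact hpos g (List.mem_cons_of_mem _ hg)
    rcases List.mem_cons.mp hf with rfl | hfL
    · simp only [List.map_cons, List.sum_cons]; omega
    · have := ih (fun g hg => hpos g (List.mem_cons_of_mem _ hg)) hfL
      simp only [List.map_cons, List.sum_cons]; omega

lemma pv_sum_sub {α : Type} (L : List α) (a b : α → Int) :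
    (L.map a).sum - (L.map b).sum = (L.map (fun x => a x - b x)).sum := by
  induction L with
  | nil => simp
  | cons x L ih => simp only [List.map_cons, List.sum_cons]; omega

-- ===== VERDICT (by name: the statements are the Claim_ definitions above) =====
theorem gap_fill_spec : Claim_unchanged_gap_fill := by
  intro target source fields _
  unfold Spec_gap_fill
  intro hD
  rw [pv_A_closed, pv_B_closed, pvSum]
  exact congrArg List.sum (List.map_congr_left (pv_contrib_eq_cb target source fields hD))

theorem gap_fill_changed : Claim_changed_gap_fill := by
  unfold Claim_changed_gap_fill; decide

theorem gap_fill_tight : Claim_exact_gap_fill := by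
  intro target source fields _ hD
  obtain ⟨f0, hf0, hc2, hv, he⟩ := (pvD_iff target source fields).mp hD
  rw [pv_A_closed, pv_B_closed]
  intro heq
  have hdiff : (1 : Int) ≤
      ((PySem.List.dedup fields).map
        (fun g => pvContrib target source g (fields.count g) - pvCB target source g)).sum := by
    apply pv_one_le_sum _ _ f0
    · intro g hgd
      have hg : g ∈ fields := (PySem.List.mem_dedup fields g).mp hgd
      have hc1 : 1 ≤ fields.count g := List.count_pos_iff.mpr hg
      unfold pvContrib pvCB
      cases hs : pvSrc source g with
      | none => simp
      | some v =>
        by_cases hemp : pvEmpty (pvTgt0 target g)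
        · by_cases hvv : v = "" ∨ v = "null"
          · simp only [hvv, hemp, Option.isSome_some, Bool.true_and, if_true]
            omega
          · simp [hvv, hemp]
        · simp [hemp]
    · exact (PySem.List.mem_dedup fields f0).mpr hf0
    · have hs0 : ∃ v, pvSrc source f0 = some v ∧ (v = "" ∨ v = "null") := by
        rcases hv with h | h
        · exact ⟨"", h, Or.inl rfl⟩
        · exact ⟨"null", h, Or.inr rfl⟩
      obtain ⟨v, hs, hvv⟩ := hs0
      unfold pvContrib pvCB
      rw [hs]
      simp only [hvv, he, Option.isSome_some, Bool.true_and, if_true]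
      omega
  rw [← pv_sum_sub] at hdiff
  unfold pvSum at heq
  omega
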